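-- pv_equiv track=rewrite | github.com/Akashleena/Yannakakis_algorithm | eval_semijoin.py | semi_join
-- ===== SOURCE A (Python) =====
-- def semi_join(parent_relation, child_relation, join_attributes):
--     """
--     Performs a semi-join between a parent and a child relation.
--
--     Parameters:
--     - parent_relation (dict): The parent relation.
--     - child_relation (dict): The child relation.
--     - join_attributes (list): The attributes to join on.
--
--     Returns:
--     - filtered_child_relation (dict): The child relation with tuples that match the parent relation.
--     """
--     parent_tuples = set(
--         tuple(parent_relation[attr][i] for attr in join_attributes)
--         for i in range(len(next(iter(parent_relation.values()))))
--     )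
--
--     filtered_child_relation = {key: [] for key in child_relation}
--     for i in range(len(next(iter(child_relation.values())))):
--         child_tuple = tuple(child_relation[attr][i] for attr in join_attributes)
--         if child_tuple in parent_tuples:
--             for key in child_relation:
--                 filtered_child_relation[key].append(child_relation[key][i])
--
--     return filtered_child_relation
-- ===== SOURCE B (Python) =====
-- def semi_join(parent_relation, child_relation, join_attributes):
--     # Group child row indices by their join-key (hash the CHILD side), then
--     # keep whole groups whose key occurs in the parent, and gather columns
--     # through the re-sorted index list.
--     nrows = len(next(iter(child_relation.values())))
--     buckets = {}
--     for i in range(nrows):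
--         key = tuple(child_relation[attr][i] for attr in join_attributes)
--         buckets.setdefault(key, []).append(i)
--     parent_keys = set(
--         tuple(parent_relation[attr][i] for attr in join_attributes)
--         for i in range(len(next(iter(parent_relation.values()))))
--     )
--     keep = []
--     for key, idxs in buckets.items():
--         if key in parent_keys:
--             keep.extend(idxs)
--     keep.sort()
--     return {key: [child_relation[key][i] for i in keep] for key in child_relation}
-- ===== Notes on version B (the rewrite author's own statement) =====
-- stated objective: alternative
-- what changed: A hashes the parent's key tuples into a set and filters the child row-by-row, appending each matching row's value to every column list; B instead groups the CHILD's row indices by join-key into a dict (hash the other side), keeps whole groups whose key is in the parent, re-sorts the collected indices and rebuilds the relation column by column. …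
import Mathlib
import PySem

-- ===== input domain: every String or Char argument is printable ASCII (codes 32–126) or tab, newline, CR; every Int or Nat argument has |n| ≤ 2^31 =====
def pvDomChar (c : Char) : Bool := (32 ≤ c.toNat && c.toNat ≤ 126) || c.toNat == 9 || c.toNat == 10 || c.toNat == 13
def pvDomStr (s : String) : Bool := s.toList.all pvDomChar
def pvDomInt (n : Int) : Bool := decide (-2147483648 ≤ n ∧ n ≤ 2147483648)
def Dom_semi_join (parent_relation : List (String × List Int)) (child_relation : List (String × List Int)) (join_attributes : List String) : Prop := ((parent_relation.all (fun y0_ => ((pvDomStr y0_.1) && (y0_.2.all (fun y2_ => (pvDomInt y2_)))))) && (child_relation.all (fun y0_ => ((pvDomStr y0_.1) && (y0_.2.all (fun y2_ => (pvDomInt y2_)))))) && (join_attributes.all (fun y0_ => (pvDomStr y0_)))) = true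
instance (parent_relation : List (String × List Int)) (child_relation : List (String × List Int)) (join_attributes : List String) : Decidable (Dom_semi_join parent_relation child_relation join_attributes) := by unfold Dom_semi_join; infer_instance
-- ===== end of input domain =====

-- ===== PORT A =====
-- B hashes the child side instead of scanning it row-by-row: it groups child row
-- indices by join-key, keeps whole groups whose key occurs in the parent, and
-- rebuilds the columns through the re-sorted index list; equal return value on Pre_.
-- dict lookup (first match on the association list; keys are Nodup under Pre_)
def pvGetCol (r : List (String × List Int)) (k : String) : List Int :=
  ((r.find? (fun p => p.1 == k)).map Prod.snd).getD []

-- tuple(rel[attr][i] for attr in join_attributes); index in range under Pre_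
def pvRow (r : List (String × List Int)) (attrs : List String) (i : Nat) : List Int :=
  attrs.map (fun a => (pvGetCol r a).getD i 0)

-- len(next(iter(rel.values()))); rel nonempty under Pre_
def pvNRows (r : List (String × List Int)) : Nat := ((r.headD ("", [])).2).length

def semi_join (parent_relation : List (String × List Int)) (child_relation : List (String × List Int)) (join_attributes : List String) : List (String × List Int) :=
  let parentTuples : PySem.Set (List Int) :=
    PySem.Set.ofList ((List.range (pvNRows parent_relation)).map
      (fun i => pvRow parent_relation join_attributes i))
  (List.range (pvNRows child_relation)).foldl
    (fun st i =>
      if pvRow child_relation join_attributes i ∈ parentTuples then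
        st.map (fun kv => (kv.1, kv.2 ++ [(pvGetCol child_relation kv.1).getD i 0]))
      else st)
    (child_relation.map (fun kv => (kv.1, ([] : List Int))))

-- ===== PORT B =====
def semi_join_alt (parent_relation : List (String × List Int)) (child_relation : List (String × List Int)) (join_attributes : List String) : List (String × List Int) :=
  -- buckets = child row indices grouped by join-key (setdefault(key, []).append(i));
  -- keep = the groups whose key is a parent key, concatenated; then keep.sort() and gather.
  child_relation.map
    (fun kv => (kv.1,
      (PySem.List.sorted
        (((((List.range (pvNRows child_relation)).map
              (fun i => (pvRow child_relation join_attributes i, i))).foldl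
            (fun d q => d.modify q.1 [] (fun l => l ++ [q.2])) PySem.Dict.empty).items).foldl
          (fun acc q => if q.1 ∈ PySem.Set.ofList ((List.range (pvNRows parent_relation)).map
              (fun i => pvRow parent_relation join_attributes i)) then acc ++ q.2 else acc) [])
        (fun x => x) false).map
        (fun i => (pvGetCol child_relation kv.1).getD i 0)))

-- ===== PRECONDITION & SPEC =====
-- Pre_ excludes empty relations, join attributes missing from either relation, parent join
-- columns and child columns shorter than their relation's first column (on which A raises
-- StopIteration/KeyError/IndexError, except for some short child columns no matched row
-- reaches), and duplicate keys, which a Python dict cannot represent.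
def Pre_semi_join (parent_relation : List (String × List Int)) (child_relation : List (String × List Int)) (join_attributes : List String) : Prop :=
  parent_relation ≠ [] ∧ child_relation ≠ [] ∧
  (parent_relation.map Prod.fst).Nodup ∧ (child_relation.map Prod.fst).Nodup ∧
  (∀ a ∈ join_attributes, a ∈ parent_relation.map Prod.fst ∧ a ∈ child_relation.map Prod.fst) ∧
  (∀ p ∈ parent_relation, p.1 ∈ join_attributes →
    ((parent_relation.headD ("", [])).2).length ≤ p.2.length) ∧
  (∀ p ∈ child_relation, ((child_relation.headD ("", [])).2).length ≤ p.2.length)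
instance (parent_relation : List (String × List Int)) (child_relation : List (String × List Int)) (join_attributes : List String) : Decidable (Pre_semi_join parent_relation child_relation join_attributes) := by unfold Pre_semi_join; infer_instance

def pvWitness_semi_join : (List (String × List Int)) × (List (String × List Int)) × List String :=
  ([("a", [1, 2])], [("a", [1, 3]), ("b", [5, 6])], ["a"])

def Spec_semi_join (parent_relation : List (String × List Int)) (child_relation : List (String × List Int)) (join_attributes : List String) (out : List (String × List Int)) : Prop := out = semi_join_alt parent_relation child_relation join_attributes
instance (parent_relation : List (String × List Int)) (child_relation : List (String × List Int)) (join_attributes : List String) (out : List (String × List Int)) : Decidable (Spec_semi_join parent_relation child_relation join_attributes out) := by unfold Spec_semi_join; infer_instance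

-- ===== CLAIM (what is proved, stated in full; the proofs are below) =====
def Claim_equal_semi_join : Prop := ∀ (parent_relation : List (String × List Int)) (child_relation : List (String × List Int)) (join_attributes : List String), Dom_semi_join parent_relation child_relation join_attributes → Pre_semi_join parent_relation child_relation join_attributes → Spec_semi_join parent_relation child_relation join_attributes (semi_join parent_relation child_relation join_attributes)

-- ===== LEMMAS AND PROOFS =====

-- A's interleaved append loop, started from per-key accumulators, equals the
-- filter-then-gather form, for any predicate P and per-key access function g.
theorem pv_foldl_filter_gather (P : Nat → Prop) [DecidablePred P] (g : String → Nat → Int)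
    (c : List (String × List Int)) :
    ∀ (l : List Nat) (acc : String → List Int),
      l.foldl
        (fun st i => if P i then st.map (fun kv => (kv.1, kv.2 ++ [g kv.1 i])) else st)
        (c.map (fun kv => (kv.1, acc kv.1)))
      = c.map (fun kv => (kv.1, acc kv.1 ++ (l.filter (fun i => decide (P i))).map (g kv.1)))
  | [], acc => by simp
  | x :: l, acc => by
      simp only [List.foldl_cons, List.filter_cons]
      by_cases hP : P x
      · have hstep :
            (c.map (fun kv => (kv.1, acc kv.1))).map
              (fun kv => (kv.1, kv.2 ++ [g kv.1 x]))
            = c.map (fun kv => (kv.1, (fun k => acc k ++ [g k x]) kv.1)) := by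
          simp [List.map_map]
        simp only [if_pos hP, hstep, pv_foldl_filter_gather P g c l (fun k => acc k ++ [g k x])]
        simp [hP]
      · simp only [if_neg hP, pv_foldl_filter_gather P g c l acc]
        simp [hP]

-- concatenating two filters by disjoint predicates is a permutation of the filter by their union
theorem pv_filter_union_perm {α : Type} (p q : α → Bool) (h : ∀ x, ¬(p x = true ∧ q x = true)) :
    ∀ (l : List α), (l.filter p ++ l.filter q).Perm (l.filter (fun x => p x || q x))
  | [] => by simp
  | x :: l => by
      by_cases hp : p x = true
      · have hq : q x = false := by
          by_contra hc
          exact h x ⟨hp, by simpa using hc⟩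
        simpa [hp, hq] using (pv_filter_union_perm p q h l).cons x
      · have hp' : p x = false := by simpa using hp
        by_cases hq : q x = true
        · have : (l.filter p ++ x :: l.filter q).Perm (x :: (l.filter p ++ l.filter q)) :=
            List.perm_middle
          simpa [hp', hq] using this.trans ((pv_filter_union_perm p q h l).cons x)
        · have hq' : q x = false := by simpa using hq
          simpa [hp', hq'] using pv_filter_union_perm p q h l
  termination_by l => l.length

-- flat-mapping the per-key filters over a duplicate-free key list is a permutation
-- of the single filter by membership in that key list
theorem pv_flatMap_filter_perm {α : Type} [BEq α] [LawfulBEq α] (row : Nat → α) (l : List Nat) :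
    ∀ (ks : List α), ks.Nodup →
      (ks.flatMap (fun k => l.filter (fun i => row i == k))).Perm
        (l.filter (fun i => decide (row i ∈ ks)))
  | [], _ => by simp
  | k :: ks, hnd => by
      have hk : k ∉ ks := (List.nodup_cons.mp hnd).1
      have ih := pv_flatMap_filter_perm row l ks (List.nodup_cons.mp hnd).2
      have hdisj : ∀ i, ¬((row i == k) = true ∧ decide (row i ∈ ks) = true) := by
        rintro i ⟨h1, h2⟩
        exact hk (by simpa [beq_iff_eq.mp h1] using of_decide_eq_true h2)
      have e1 : (k :: ks).flatMap (fun k => l.filter (fun i => row i == k))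
          = l.filter (fun i => row i == k)
              ++ ks.flatMap (fun k => l.filter (fun i => row i == k)) := by simp
      have e2 : l.filter (fun i => (row i == k) || decide (row i ∈ ks))
          = l.filter (fun i => decide (row i ∈ k :: ks)) := by
        apply List.filter_congr; intro i _
        by_cases h : row i = k <;> simp [h]
      rw [e1, ← e2]
      exact (ih.append_left _).trans (pv_filter_union_perm _ _ hdisj l)

-- B's keep list (bucket groups whose key is in s, concatenated) is a permutation of
-- A's keep list (the row-index filter), for any key function and membership list.
theorem pv_keep_perm {α : Type} [BEq α] [LawfulBEq α] (row : Nat → α) (n : Nat) (s : List α) :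
    (((((List.range n).map (fun i => (row i, i))).foldl
        (fun d q => d.modify q.1 [] (fun l => l ++ [q.2])) PySem.Dict.empty).items).foldl
      (fun acc q => if q.1 ∈ s then acc ++ q.2 else acc) []).Perm
    ((List.range n).filter (fun i => decide (row i ∈ s))) := by
  set pairs := (List.range n).map (fun i => (row i, i)) with hpairs
  set d := pairs.foldl (fun d q => d.modify q.1 [] (fun l => l ++ [q.2])) PySem.Dict.empty with hd
  have hnd : d.keys.Nodup := by
    rw [hd, hpairs]
    have := PySem.Dict.nodup_keys_foldl_modify_key
      ((List.range n).map (fun i => (row i, i))) (fun q => q.1) []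
      (fun _ q => (fun l => l ++ [q.2])) PySem.Dict.empty (by simp)
    -- the fold in `this` is definitionally ours
    simpa using this
  -- each bucket's value is the filtered index list of its key
  have hval : ∀ q ∈ d.items, q.2 = (List.range n).filter (fun i => row i == q.1) := by
    intro q hq
    have h1 : d.getD q.1 [] = q.2 := by
      rcases q with ⟨k, v⟩
      exact PySem.Dict.getD_of_mem_items d hq hnd []
    have h2 : d.getD q.1 [] =
        PySem.Dict.empty.getD q.1 [] ++ (pairs.filter (fun p => p.1 == q.1)).map (·.2) := by
      rw [hd]; exact PySem.Dict.getD_foldl_modify_append pairs PySem.Dict.empty q.1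
    rw [← h1, h2, hpairs]
    simp [List.filter_map, List.map_map, Function.comp_def]
  -- the keep fold is the flatMap over the filtered items
  have hfold : ∀ (its : List (α × List Nat)) (acc : List Nat),
      its.foldl (fun acc q => if q.1 ∈ s then acc ++ q.2 else acc) acc
        = acc ++ (its.filter (fun q => decide (q.1 ∈ s))).flatMap (·.2) := by
    intro its
    induction its with
    | nil => simp
    | cons q its ih =>
        intro acc
        by_cases h : q.1 ∈ s <;> simp [h, ih, List.append_assoc]
  rw [hfold]
  -- replace each bucket value by its filtered-index characterisation
  have hflat : (d.items.filter (fun q => decide (q.1 ∈ s))).flatMap (·.2)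
      = (d.keys.filter (fun k => decide (k ∈ s))).flatMap
          (fun k => (List.range n).filter (fun i => row i == k)) := by
    have h1 : (d.items.filter (fun q => decide (q.1 ∈ s))).flatMap (·.2)
        = (d.items.filter (fun q => decide (q.1 ∈ s))).flatMap
            (fun q => (List.range n).filter (fun i => row i == q.1)) := by
      apply List.flatMap_congr
      intro q hq
      exact hval q (List.mem_of_mem_filter hq)
    rw [h1]
    have h2 : (d.items.filter (fun q => decide (q.1 ∈ s))).map (·.1)
        = d.keys.filter (fun k => decide (k ∈ s)) := by
      simp [PySem.Dict.keys, List.filter_map, Function.comp_def]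
    rw [← h2, List.flatMap_map]
  rw [hflat]
  have hkeys : ∀ i ∈ List.range n, row i ∈ d.keys := by
    intro i hi
    rw [hd, hpairs]
    have := PySem.Dict.keys_foldl_modify_key
      ((List.range n).map (fun i => (row i, i))) (fun q => q.1) []
      (fun _ q => (fun l => l ++ [q.2])) PySem.Dict.empty
    simp only [this]
    have : row i ∈ (List.range n).map row := List.mem_map_of_mem hi
    simp only [PySem.Dict.keys_empty]
    have hupd : PySem.Set.update ([] : List α)
        (((List.range n).map (fun i => (row i, i))).map (fun q => q.1))
        = PySem.Set.ofList (((List.range n).map (fun i => (row i, i))).map (fun q => q.1)) := rfl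
    rw [hupd]
    rw [PySem.Set.mem_ofList]
    simpa [List.map_map, Function.comp_def] using this
  have hperm := pv_flatMap_filter_perm row (List.range n)
    (d.keys.filter (fun k => decide (k ∈ s))) (hnd.filter _)
  refine hperm.trans ?_
  have : (List.range n).filter
      (fun i => decide (row i ∈ d.keys.filter (fun k => decide (k ∈ s))))
      = (List.range n).filter (fun i => decide (row i ∈ s)) := by
    apply List.filter_congr
    intro i hi
    simp [List.mem_filter, hkeys i hi]
  rw [this]

-- sorting B's keep list recovers A's keep list exactly
theorem pv_keep_sorted {α : Type} [BEq α] [LawfulBEq α] (row : Nat → α) (n : Nat) (s : List α) :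
    PySem.List.sorted
      (((((List.range n).map (fun i => (row i, i))).foldl
          (fun d q => d.modify q.1 [] (fun l => l ++ [q.2])) PySem.Dict.empty).items.foldl
        (fun acc q => if q.1 ∈ s then acc ++ q.2 else acc) []))
      (fun x => x) false
    = (List.range n).filter (fun i => decide (row i ∈ s)) := by
  apply PySem.List.sorted_eq_of_perm_of_pairwise_lt
  · exact (pv_keep_perm row n s).symm
  · exact (List.pairwise_lt_range).filter _

theorem semi_join_eq_alt (parent_relation : List (String × List Int)) (child_relation : List (String × List Int)) (join_attributes : List String) :
    semi_join parent_relation child_relation join_attributes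
      = semi_join_alt parent_relation child_relation join_attributes := by
  unfold semi_join semi_join_alt
  refine (pv_foldl_filter_gather
    (fun i => pvRow child_relation join_attributes i ∈
        PySem.Set.ofList ((List.range (pvNRows parent_relation)).map
          (fun i => pvRow parent_relation join_attributes i)))
    (fun k i => (pvGetCol child_relation k).getD i 0)
    child_relation (List.range (pvNRows child_relation)) (fun _ => [])).trans ?_
  apply List.map_congr_left
  intro kv _
  simp only [List.nil_append]
  exact congrArg
    (fun t => (kv.1, t.map (fun i => (pvGetCol child_relation kv.1).getD i 0)))
    (pv_keep_sorted (fun i => pvRow child_relation join_attributes i)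
      (pvNRows child_relation)
      (PySem.Set.ofList ((List.range (pvNRows parent_relation)).map
        (fun i => pvRow parent_relation join_attributes i)))).symm

-- ===== VERDICT (by name: the statement is the Claim_ definition above) =====
theorem semi_join_spec : Claim_equal_semi_join := by
  intro p c j _ _
  unfold Spec_semi_join
  exact semi_join_eq_alt p c j
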